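-- pv_equiv track=rewrite | github.com/neimasilk/modern_kata_kupas | experiments/evaluate.py | extract_affixes
-- ===== SOURCE A (Python) =====
-- from typing import List, Dict, Any, Optional, Tuple, Set
--
-- def extract_affixes(morphemes: List[str]) -> Tuple[List[str], List[str]]:
--     """
--     Extract prefixes and suffixes from morphemes.
--
--     Args:
--         morphemes: List of morphemes
--
--     Returns:
--         Tuple of (prefixes, suffixes)
--     """
--     prefixes = {'meN', 'ber', 'ter', 'di', 'peN', 'per', 'ke', 'se'}
--     suffixes = {'kan', 'i', 'an', 'lah', 'kah', 'pun', 'tah', 'nya', 'ku', 'mu'}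
--     markers = {'ulg', 'rp', 'rs'}
--
--     pref_list = []
--     suff_list = []
--     after_root = False
--
--     for m in morphemes:
--         if m in markers or m.startswith('rs('):
--             after_root = True
--         elif m in prefixes:
--             pref_list.append(m)
--         elif m in suffixes:
--             suff_list.append(m)
--             after_root = True
--         elif after_root:
--             # After we hit a suffix-like marker, everything after is suffix
--             suff_list.append(m)
--         else:
--             # This is likely the root
--             after_root = True
--
--     return pref_list, suff_list
-- ===== SOURCE B (Python) =====
-- def extract_affixes(morphemes):
--     """
--     Extract prefixes and suffixes from morphemes.
--
--     Different decomposition: instead of a stateful scan with an after_root flag,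
--     note that after_root becomes (and stays) True right after the first morpheme
--     that is not a prefix.  So compute k = index of that first non-prefix morpheme,
--     take the prefix list in one comprehension, and build the suffix list in a
--     second comprehension keyed on k.
--     """
--     prefixes = {'meN', 'ber', 'ter', 'di', 'peN', 'per', 'ke', 'se'}
--     suffixes = {'kan', 'i', 'an', 'lah', 'kah', 'pun', 'tah', 'nya', 'ku', 'mu'}
--     markers = {'ulg', 'rp', 'rs'}
--
--     k = next((i for i, m in enumerate(morphemes) if m not in prefixes),
--              len(morphemes))
--     pref_list = [m for m in morphemes if m in prefixes]
--     suff_list = [m for i, m in enumerate(morphemes)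
--                  if m in suffixes
--                  or (i > k and m not in prefixes and m not in markers
--                      and not m.startswith('rs('))]
--     return pref_list, suff_list
-- ===== Notes on version B (the rewrite author's own statement) =====
-- stated objective: alternative
-- what changed: Replaces the stateful after_root-flag scan by a flag-free decomposition: k = index of the first non-prefix morpheme (where after_root first becomes true), then the prefix list via one filter pass and the suffix list via a second index-based pass keyed on k.
import Mathlib
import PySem

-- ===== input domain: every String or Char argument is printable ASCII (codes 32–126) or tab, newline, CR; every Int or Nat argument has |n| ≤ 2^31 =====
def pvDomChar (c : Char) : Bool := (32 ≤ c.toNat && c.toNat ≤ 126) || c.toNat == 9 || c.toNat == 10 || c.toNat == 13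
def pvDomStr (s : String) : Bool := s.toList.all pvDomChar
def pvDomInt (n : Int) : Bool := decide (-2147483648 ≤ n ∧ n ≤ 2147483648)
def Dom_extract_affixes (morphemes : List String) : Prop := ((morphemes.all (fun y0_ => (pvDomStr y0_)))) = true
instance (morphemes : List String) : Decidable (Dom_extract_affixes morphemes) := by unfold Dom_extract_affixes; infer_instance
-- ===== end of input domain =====

-- B replaces A's stateful after_root-flag scan by a flag-free decomposition keyed on the
-- index of the first non-prefix morpheme (objective: alternative, same cost).

-- ===== PORT A =====
def pvPrefixes : PySem.Set String := PySem.Set.ofList ["meN", "ber", "ter", "di", "peN", "per", "ke", "se"]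
def pvSuffixes : PySem.Set String := PySem.Set.ofList ["kan", "i", "an", "lah", "kah", "pun", "tah", "nya", "ku", "mu"]
def pvMarkers : PySem.Set String := PySem.Set.ofList ["ulg", "rp", "rs"]

-- A's loop: state (pref_list, suff_list, after_root), branches in A's order.
def extractLoopA : List String → List String → List String → Bool → List String × List String
  | [], pref, suff, _ => (pref, suff)
  | m :: rest, pref, suff, ar =>
    if PySem.Set.contains pvMarkers m || PySem.Str.startswith m "rs(" then
      extractLoopA rest pref suff true
    else if PySem.Set.contains pvPrefixes m then
      extractLoopA rest (pref ++ [m]) suff ar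
    else if PySem.Set.contains pvSuffixes m then
      extractLoopA rest pref (suff ++ [m]) true
    else if ar then
      extractLoopA rest pref (suff ++ [m]) ar
    else
      extractLoopA rest pref suff true

def extract_affixes (morphemes : List String) : List String × List String :=
  extractLoopA morphemes [] [] false

-- ===== PORT B =====
-- k = next((i for i, m in enumerate(morphemes) if m not in prefixes), len(morphemes))
def firstNonPref : List String → Nat
  | [] => 0
  | m :: rest => if PySem.Set.contains pvPrefixes m then firstNonPref rest + 1 else 0

-- [m for i, m in enumerate(morphemes) if m in suffixes or (i > k and …)]
def suffPass (k : Nat) : Nat → List String → List String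
  | _, [] => []
  | i, m :: rest =>
    if PySem.Set.contains pvSuffixes m ||
       (decide (i > k) && !PySem.Set.contains pvPrefixes m && !PySem.Set.contains pvMarkers m
        && !PySem.Str.startswith m "rs(") then
      m :: suffPass k (i + 1) rest
    else
      suffPass k (i + 1) rest

def extract_affixes_alt (morphemes : List String) : List String × List String :=
  let k := firstNonPref morphemes
  (morphemes.filter (fun m => PySem.Set.contains pvPrefixes m), suffPass k 0 morphemes)

-- ===== PRECONDITION & SPEC =====
def Spec_extract_affixes (morphemes : List String) (out : List String × List String) : Prop := out = extract_affixes_alt morphemes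
instance (morphemes : List String) (out : List String × List String) : Decidable (Spec_extract_affixes morphemes out) := by unfold Spec_extract_affixes; infer_instance

-- ===== CLAIM (what is proved, stated in full; the proofs are below) =====
def Claim_equal_extract_affixes : Prop := ∀ (morphemes : List String), Dom_extract_affixes morphemes → Spec_extract_affixes morphemes (extract_affixes morphemes)

-- ===== LEMMAS AND PROOFS =====

-- finite-literal facts (stated in simp-normal form) --------------------------
lemma pref_facts {m : String} (h : m ∈ pvPrefixes) :
    m ∉ pvSuffixes ∧ m ∉ pvMarkers ∧ PySem.Chars.startswith m.toList ['r', 's', '('] = false := by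
  have hm : m ∈ (["meN", "ber", "ter", "di", "peN", "per", "ke", "se"] : List String) := by
    simpa [pvPrefixes, PySem.Set.mem_ofList] using h
  fin_cases hm <;> refine ⟨by decide, by decide, by decide⟩

lemma suff_facts {m : String} (h : m ∈ pvSuffixes) :
    m ∉ pvPrefixes ∧ m ∉ pvMarkers ∧ PySem.Chars.startswith m.toList ['r', 's', '('] = false := by
  have hm : m ∈ (["kan", "i", "an", "lah", "kah", "pun", "tah", "nya", "ku", "mu"] : List String) := by
    simpa [pvSuffixes, PySem.Set.mem_ofList] using h
  fin_cases hm <;> refine ⟨by decide, by decide, by decide⟩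

-- A's loop once after_root is true -------------------------------------------
lemma loopA_true (ms : List String) : ∀ pref suff,
    extractLoopA ms pref suff true =
      (pref ++ ms.filter (fun m => PySem.Set.contains pvPrefixes m),
       suff ++ ms.filter (fun m =>
         !(PySem.Set.contains pvMarkers m || PySem.Str.startswith m "rs(") &&
         !PySem.Set.contains pvPrefixes m)) := by
  induction ms with
  | nil => intro pref suff; simp [extractLoopA]
  | cons m rest ih =>
    intro pref suff
    by_cases hp : m ∈ pvPrefixes
    · obtain ⟨hs, hk, hr⟩ := pref_facts hp
      simp [extractLoopA, hp, hk, hr, ih]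
    · by_cases hk : m ∈ pvMarkers
      · have hps : m ∉ pvSuffixes := fun h => (suff_facts h).2.1 hk
        simp [extractLoopA, hp, hk, ih]
      · by_cases hr : PySem.Chars.startswith m.toList ['r', 's', '('] = true
        · have hps : m ∉ pvSuffixes := fun h => by
            have := (suff_facts h).2.2; rw [hr] at this; simp at this
          simp [extractLoopA, hp, hk, hr, ih]
        · rw [Bool.not_eq_true] at hr
          by_cases hs : m ∈ pvSuffixes
          · simp [extractLoopA, hp, hk, hr, hs, ih]
          · simp [extractLoopA, hp, hk, hr, hs, ih]

-- B's tail pass once the index has passed k ----------------------------------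
lemma suffPass_gt (k : Nat) (ms : List String) : ∀ i, k < i →
    suffPass k i ms = ms.filter (fun m =>
      !(PySem.Set.contains pvMarkers m || PySem.Str.startswith m "rs(") &&
      !PySem.Set.contains pvPrefixes m) := by
  induction ms with
  | nil => intro i _; simp [suffPass]
  | cons m rest ih =>
    intro i hi
    have hrest := ih (i + 1) (Nat.lt_succ_of_lt hi)
    by_cases hs : m ∈ pvSuffixes
    · obtain ⟨hp, hk, hr⟩ := suff_facts hs
      simp [suffPass, hs, hp, hk, hr, hi, hrest]
    · by_cases hp : m ∈ pvPrefixes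
      · simp [suffPass, hs, hp, hi, hrest]
      · by_cases hk : m ∈ pvMarkers
        · simp [suffPass, hs, hp, hk, hi, hrest]
        · by_cases hr : PySem.Chars.startswith m.toList ['r', 's', '('] = true
          · simp [suffPass, hs, hp, hk, hr, hi, hrest]
          · rw [Bool.not_eq_true] at hr
            simp [suffPass, hs, hp, hk, hr, hi, hrest]

-- main induction: walking the leading run of prefixes ------------------------
lemma loop_eq (ms : List String) : ∀ pref suff i,
    extractLoopA ms pref suff false =
      (pref ++ ms.filter (fun m => PySem.Set.contains pvPrefixes m),
       suff ++ suffPass (i + firstNonPref ms) i ms) := by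
  induction ms with
  | nil => intro pref suff i; simp [extractLoopA, suffPass]
  | cons m rest ih =>
    intro pref suff i
    by_cases hp : m ∈ pvPrefixes
    · -- prefix: A appends to pref, B skips it in suffPass (index ≤ k, not a suffix)
      obtain ⟨hs, hk, hr⟩ := pref_facts hp
      have hknat : i + firstNonPref (m :: rest) = (i + 1) + firstNonPref rest := by
        simp only [firstNonPref]
        rw [if_pos (by simpa [PySem.Set.contains_iff] using hp)]
        omega
      have hle : ¬ i + firstNonPref (m :: rest) < i := by omega
      rw [show extractLoopA (m :: rest) pref suff false
            = extractLoopA rest (pref ++ [m]) suff false by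
          simp [extractLoopA, hp, hk, hr]]
      rw [ih (pref ++ [m]) suff (i + 1), ← hknat]
      simp [suffPass, hs, hp, hle]
    · -- first non-prefix morpheme: k = i here, after_root becomes true
      have hknat : i + firstNonPref (m :: rest) = i := by
        simp only [firstNonPref]
        rw [if_neg (by simpa [PySem.Set.contains_iff] using hp)]
        omega
      have hrest := suffPass_gt i rest (i + 1) (Nat.lt_succ_self i)
      by_cases hk : m ∈ pvMarkers
      · have hps : m ∉ pvSuffixes := fun h => (suff_facts h).2.1 hk
        simp [extractLoopA, hp, hk, hps, loopA_true, hknat, suffPass, hrest,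
          List.filter_cons]
      · by_cases hr : PySem.Chars.startswith m.toList ['r', 's', '('] = true
        · have hps : m ∉ pvSuffixes := fun h => by
            have := (suff_facts h).2.2; rw [hr] at this; simp at this
          simp [extractLoopA, hp, hk, hr, hps, loopA_true, hknat, suffPass, hrest,
            List.filter_cons]
        · rw [Bool.not_eq_true] at hr
          by_cases hs : m ∈ pvSuffixes
          · simp [extractLoopA, hp, hk, hr, hs, loopA_true, hknat, suffPass, hrest,
              List.filter_cons]
          · simp [extractLoopA, hp, hk, hr, hs, loopA_true, hknat, suffPass, hrest,
              List.filter_cons]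

-- ===== VERDICT (by name: the statement is the Claim_ definition above) =====
theorem extract_affixes_spec : Claim_equal_extract_affixes := by
  intro morphemes _
  unfold Spec_extract_affixes extract_affixes extract_affixes_alt
  simpa using loop_eq morphemes [] [] 0
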